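-- pv_equiv track=rewrite | github.com/snowman41/Labyrinth-for-CS-370 | Labyrinth_Demo1_Functions.py | getTileCoordinates
-- ===== SOURCE A (Python) =====
-- def getTileCoordinates(tileNum):#Function which gives coordinates of tile
-- 	listOfCoords = []#Stores coordinates
-- 	index = 0
-- 	xVal = 255
-- 	yVal = 115
--
-- 	for x in range(49):#Fill ListOfCoords with coordinates
-- 		if(x < 7):
-- 			coords = tuple([xVal , yVal])
-- 			listOfCoords.insert(x ,coords)
-- 			xVal += 105
-- 		elif(x < 14):
-- 			if (x == 7):
-- 				xVal = 255
-- 				yVal += 105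
-- 			coords = tuple([xVal , yVal])
-- 			listOfCoords.insert(x ,coords)
-- 			xVal += 105
-- 		elif(x < 21):
-- 			if (x == 14):
-- 				xVal = 255
-- 				yVal += 105
-- 			coords = tuple([xVal , yVal])
-- 			listOfCoords.insert(x ,coords)
-- 			xVal += 105
-- 		elif(x < 28):
-- 			if (x == 21):
-- 				xVal = 255
-- 				yVal += 105
-- 			coords = tuple([xVal , yVal])
-- 			listOfCoords.insert(x ,coords)
-- 			xVal += 105
-- 		elif(x < 35):
-- 			if (x == 28):
-- 				xVal = 255
-- 				yVal += 105
-- 			coords = tuple([xVal , yVal])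
-- 			listOfCoords.insert(x ,coords)
-- 			xVal += 105
-- 		elif(x < 42):
-- 			if (x == 35):
-- 				xVal = 255
-- 				yVal += 105
-- 			coords = tuple([xVal , yVal])
-- 			listOfCoords.insert(x ,coords)
-- 			xVal += 105
-- 		elif(x < 49):
-- 			if (x == 42):
-- 				xVal = 255
-- 				yVal += 105
-- 			coords = tuple([xVal , yVal])
-- 			listOfCoords.insert(x ,coords)
-- 			xVal += 105
-- 	for coords in listOfCoords:
-- 		if(tileNum - 1 == index):
-- 			return coords
-- 		index += 1
-- ===== SOURCE B (Python) =====
-- def getTileCoordinates(tileNum):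
--     # Closed form: tile t (1..49) sits at column (t-1)%7, row (t-1)//7 of a 7x7 grid
--     # whose top-left tile is (255, 115) with 105-pixel pitch. No list, no scan.
--     idx = tileNum - 1
--     if idx not in range(49):
--         return None
--     i = int(idx)
--     return (255 + 105 * (i % 7), 115 + 105 * (i // 7))
-- ===== Notes on version B (the rewrite author's own statement) =====
-- stated objective: simpler
-- what changed: Replaced building a 49-element coordinate list via a seven-branch loop and then scanning it linearly with a direct closed-form row/column arithmetic from tileNum.
import Mathlib
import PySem

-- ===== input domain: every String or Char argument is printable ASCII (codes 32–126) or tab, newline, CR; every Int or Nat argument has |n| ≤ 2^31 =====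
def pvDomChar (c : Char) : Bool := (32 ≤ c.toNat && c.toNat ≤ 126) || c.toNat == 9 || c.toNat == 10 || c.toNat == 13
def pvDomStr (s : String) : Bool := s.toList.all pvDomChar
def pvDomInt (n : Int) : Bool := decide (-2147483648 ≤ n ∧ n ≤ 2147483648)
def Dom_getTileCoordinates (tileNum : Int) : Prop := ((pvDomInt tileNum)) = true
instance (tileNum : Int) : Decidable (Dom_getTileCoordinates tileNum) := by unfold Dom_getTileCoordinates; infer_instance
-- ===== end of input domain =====

-- B replaces A's build-a-49-element-list-then-scan with a direct closed-form
-- row/column computation; objective: simpler (constant work instead of two passes).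
set_option maxRecDepth 100000


-- ===== PORT A =====
-- one iteration of A's fill loop: state (listOfCoords, xVal, yVal), loop variable x
def pvFillStepA (st : List (Int × Int) × Int × Int) (x : Int) :
    List (Int × Int) × Int × Int :=
  let (listOfCoords, xVal, yVal) := st
  if x < 7 then
    (PySem.List.insert listOfCoords x (xVal, yVal), xVal + 105, yVal)
  else if x < 14 then
    let (xVal, yVal) := if x = 7 then ((255 : Int), yVal + 105) else (xVal, yVal)
    (PySem.List.insert listOfCoords x (xVal, yVal), xVal + 105, yVal)
  else if x < 21 then
    let (xVal, yVal) := if x = 14 then ((255 : Int), yVal + 105) else (xVal, yVal)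
    (PySem.List.insert listOfCoords x (xVal, yVal), xVal + 105, yVal)
  else if x < 28 then
    let (xVal, yVal) := if x = 21 then ((255 : Int), yVal + 105) else (xVal, yVal)
    (PySem.List.insert listOfCoords x (xVal, yVal), xVal + 105, yVal)
  else if x < 35 then
    let (xVal, yVal) := if x = 28 then ((255 : Int), yVal + 105) else (xVal, yVal)
    (PySem.List.insert listOfCoords x (xVal, yVal), xVal + 105, yVal)
  else if x < 42 then
    let (xVal, yVal) := if x = 35 then ((255 : Int), yVal + 105) else (xVal, yVal)
    (PySem.List.insert listOfCoords x (xVal, yVal), xVal + 105, yVal)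
  else if x < 49 then
    let (xVal, yVal) := if x = 42 then ((255 : Int), yVal + 105) else (xVal, yVal)
    (PySem.List.insert listOfCoords x (xVal, yVal), xVal + 105, yVal)
  else (listOfCoords, xVal, yVal)

-- A's second loop: 'for coords in listOfCoords: if tileNum - 1 == index: return coords; index += 1'
def pvScanA (tileNum : Int) : List (Int × Int) → Int → Option (Int × Int)
  | [], _ => none
  | coords :: rest, index =>
      if tileNum - 1 = index then some coords else pvScanA tileNum rest (index + 1)

def getTileCoordinates (tileNum : Int) : Option (Int × Int) :=
  let st := (PySem.List.pyRange 0 49 1).foldl pvFillStepA (([] : List (Int × Int)), 255, 115)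
  pvScanA tileNum st.1 0

-- ===== PORT B =====
def getTileCoordinates_alt (tileNum : Int) : Option (Int × Int) :=
  let idx := tileNum - 1
  if ¬ (0 ≤ idx ∧ idx < 49) then none
  else some (255 + 105 * PySem.Int.mod idx 7, 115 + 105 * PySem.Int.floordiv idx 7)

-- ===== PRECONDITION & SPEC =====
def Spec_getTileCoordinates (tileNum : Int) (out : Option (Int × Int)) : Prop := out = getTileCoordinates_alt tileNum
instance (tileNum : Int) (out : Option (Int × Int)) : Decidable (Spec_getTileCoordinates tileNum out) := by unfold Spec_getTileCoordinates; infer_instance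

-- ===== CLAIM (what is proved, stated in full; the proofs are below) =====
def Claim_equal_getTileCoordinates : Prop := ∀ (tileNum : Int), Dom_getTileCoordinates tileNum → Spec_getTileCoordinates tileNum (getTileCoordinates tileNum)

-- ===== LEMMAS AND PROOFS =====
theorem pv_scan_none (t : Int) : ∀ (L : List (Int × Int)) (i : Int),
    (t - 1 < i ∨ i + L.length ≤ t - 1) → pvScanA t L i = none := by
  intro L
  induction L with
  | nil => intro i _; rfl
  | cons c rest ih =>
      intro i hb
      simp only [pvScanA, List.length_cons] at *
      have hne : ¬ (t - 1 = i) := by push_cast at hb; omega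
      rw [if_neg hne]
      apply ih
      push_cast at hb ⊢
      omega

theorem pv_len49 :
    ((PySem.List.pyRange 0 49 1).foldl pvFillStepA (([] : List (Int × Int)), 255, 115)).1.length = 49 := by
  decide

theorem pv_eq (tileNum : Int) : getTileCoordinates tileNum = getTileCoordinates_alt tileNum := by
  by_cases h : 0 ≤ tileNum - 1 ∧ tileNum - 1 < 49
  · have h1 : 1 ≤ tileNum := by omega
    have h2 : tileNum ≤ 49 := by omega
    clear h
    interval_cases tileNum <;> decide
  · have hnone : getTileCoordinates_alt tileNum = none := by
      unfold getTileCoordinates_alt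
      simp only [if_pos h]
    rw [hnone]
    unfold getTileCoordinates
    apply pv_scan_none
    rw [pv_len49]
    omega

-- ===== VERDICT (by name: the statement is the Claim_ definition above) =====
theorem getTileCoordinates_spec : Claim_equal_getTileCoordinates := by
  intro tileNum _
  unfold Spec_getTileCoordinates
  exact pv_eq tileNum
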